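-- pv_equiv track=rewrite | github.com/SergioTA01229274/Python-Code | Finalpartial/Repaso2.py | extension_frecuente
-- ===== SOURCE A (Python) =====
-- def extension_frecuente(List):
--     newList = [0, 0, 0]
--     for i in List:
--         components = i.split(".")
--         if components[1] == "txt":
--             newList[0] += 1
--         elif components[1] == "docx":
--             newList[1] += 1
--         elif components[1] == "py":
--             newList[2] += 1
--     if newList[0] == max(newList):
--         return ".txt"
--     elif newList[1] == max(newList):
--         return ".docx"
--     elif newList[2] == max(newList):
--         return ".py"
-- ===== SOURCE B (Python) =====
-- def extension_frecuente(List):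
--     txt = sum(1 for i in List if i.split(".")[1] == "txt")
--     docx = sum(1 for i in List if i.split(".")[1] == "docx")
--     py = sum(1 for i in List if i.split(".")[1] == "py")
--     m = max(txt, docx, py)
--     if txt == m:
--         return ".txt"
--     elif docx == m:
--         return ".docx"
--     else:
--         return ".py"
-- ===== Notes on version B (the rewrite author's own statement) =====
-- stated objective: alternative
-- what changed: B replaces A's single loop mutating a three-slot counter list with three independent counting passes (one sum per extension) followed by the same tie-priority comparison; same O(n) cost.
import Mathlib
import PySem

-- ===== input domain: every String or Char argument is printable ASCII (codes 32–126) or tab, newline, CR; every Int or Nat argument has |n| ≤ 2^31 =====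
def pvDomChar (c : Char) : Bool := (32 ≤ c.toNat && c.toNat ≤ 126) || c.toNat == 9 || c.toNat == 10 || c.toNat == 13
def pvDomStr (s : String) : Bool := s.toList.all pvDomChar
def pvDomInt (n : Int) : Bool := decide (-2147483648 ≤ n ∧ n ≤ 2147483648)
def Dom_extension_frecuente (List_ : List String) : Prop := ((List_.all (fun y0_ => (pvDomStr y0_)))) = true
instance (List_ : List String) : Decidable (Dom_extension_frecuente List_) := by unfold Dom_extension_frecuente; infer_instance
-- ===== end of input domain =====

-- B replaces A's single loop over a mutated three-slot counter list by three independent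
-- counting passes (one per extension) and the same priority comparison; same O(n) cost.

-- i.split("."): split? is always some for the nonempty separator "."; getD is unreachable
def pySplitDot (s : String) : List String :=
  (PySem.Str.split? s ".").getD []

-- ===== PORT A =====
-- one loop, state = the three counters newList[0..2]; components[1] missing = IndexError = none
def extFrecStepA (st : Option (Int × Int × Int)) (i : String) : Option (Int × Int × Int) :=
  st.bind fun (t, d, p) =>
    match PySem.List.pyGet? (pySplitDot i) 1 with
    | none => none
    | some c =>
      if c = "txt" then some (t + 1, d, p)
      else if c = "docx" then some (t, d + 1, p)
      else if c = "py" then some (t, d, p + 1)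
      else some (t, d, p)

def extension_frecuente (List_ : List String) : Option String :=
  match List_.foldl extFrecStepA (some (0, 0, 0)) with
  | none => none
  | some (t, d, p) =>
    let m := max t (max d p)   -- max(newList)
    if t = m then some ".txt"
    else if d = m then some ".docx"
    else if p = m then some ".py"
    else none

-- ===== PORT B =====
-- sum(1 for i in L if i.split(".")[1] == e): a counting pass; IndexError = none
def extFrecCount (L : List String) (e : String) : Option Int :=
  L.foldl (fun acc i =>
    acc.bind fun n =>
      (PySem.List.pyGet? (pySplitDot i) 1).map fun c =>
        if c = e then n + 1 else n) (some 0)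

def extension_frecuente_alt (List_ : List String) : Option String :=
  match extFrecCount List_ "txt", extFrecCount List_ "docx", extFrecCount List_ "py" with
  | some txt, some docx, some py =>
    let m := max txt (max docx py)
    if txt = m then some ".txt"
    else if docx = m then some ".docx"
    else some ".py"
  | _, _, _ => none

-- ===== PRECONDITION & SPEC =====
-- Pre_ excludes exactly the inputs containing a name with no "." : there components[1]
-- raises IndexError in A (and B raises the same).
def Pre_extension_frecuente (List_ : List String) : Prop :=
  ∀ s ∈ List_, 2 ≤ (pySplitDot s).length

instance (List_ : List String) : Decidable (Pre_extension_frecuente List_) := by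
  unfold Pre_extension_frecuente; infer_instance

def pvWitness_extension_frecuente : List String := ["a.txt", "b.py", "c.txt"]

def Spec_extension_frecuente (List_ : List String) (out : Option String) : Prop := out = extension_frecuente_alt List_
instance (List_ : List String) (out : Option String) : Decidable (Spec_extension_frecuente List_ out) := by unfold Spec_extension_frecuente; infer_instance

-- ===== CLAIM (what is proved, stated in full; the proofs are below) =====
def Claim_equal_extension_frecuente : Prop := ∀ (List_ : List String), Dom_extension_frecuente List_ → Pre_extension_frecuente List_ → Spec_extension_frecuente List_ (extension_frecuente List_)

-- ===== LEMMAS AND PROOFS =====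

-- second split component, when it exists
def extFrecExt? (s : String) : Option String :=
  PySem.List.pyGet? (pySplitDot s) 1

theorem extFrecExt?_isSome {s : String} (h : 2 ≤ (pySplitDot s).length) :
    (extFrecExt? s).isSome := by
  unfold extFrecExt?
  rcases hs : pySplitDot s with _ | ⟨a, _ | ⟨b, rest⟩⟩
  · rw [hs] at h; simp at h
  · rw [hs] at h; simp at h
  · simp [PySem.List.pyGet?, PySem.List.pyIdx?]

-- number of list elements whose extension is e
def extFrecCnt (L : List String) (e : String) : Int :=
  (L.countP (fun s => extFrecExt? s = some e) : Int)

theorem extFrecCnt_cons (s : String) (L : List String) (e : String) :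
    extFrecCnt (s :: L) e =
      (if extFrecExt? s = some e then 1 else 0) + extFrecCnt L e := by
  unfold extFrecCnt
  by_cases h : extFrecExt? s = some e <;> simp [h] <;> ring

-- A's loop computes the three counts
theorem extFrecFoldA (L : List String)
    (hpre : ∀ s ∈ L, 2 ≤ (pySplitDot s).length) :
    ∀ t d p, L.foldl extFrecStepA (some (t, d, p)) =
      some (t + extFrecCnt L "txt", d + extFrecCnt L "docx", p + extFrecCnt L "py") := by
  induction L with
  | nil => intro t d p; simp [extFrecCnt]
  | cons s L ih =>
    intro t d p
    have hs := extFrecExt?_isSome (hpre s (by simp))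
    obtain ⟨c, hc⟩ := Option.isSome_iff_exists.mp hs
    have hrest : ∀ x ∈ L, 2 ≤ (pySplitDot x).length :=
      fun x hx => hpre x (List.mem_cons_of_mem _ hx)
    have hcons : ∀ e, extFrecCnt (s :: L) e =
        (if c = e then 1 else 0) + extFrecCnt L e := by
      intro e; rw [extFrecCnt_cons]
      congr 1
      by_cases h : c = e <;> simp [hc, h]
    simp only [List.foldl_cons, extFrecStepA, Option.bind_some]
    rw [show PySem.List.pyGet? (pySplitDot s) 1 = some c from hc]
    by_cases h1 : c = "txt"
    · simp [h1, ih hrest, hcons]; ring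
    · by_cases h2 : c = "docx"
      · simp [h2, ih hrest, hcons]; ring
      · by_cases h3 : c = "py"
        · simp [h3, ih hrest, hcons]; ring
        · simp [h1, h2, h3, ih hrest, hcons]

-- B's pass computes one count
theorem extFrecCount_eq (L : List String) (e : String)
    (hpre : ∀ s ∈ L, 2 ≤ (pySplitDot s).length) :
    extFrecCount L e = some (extFrecCnt L e) := by
  suffices h : ∀ n : Int, L.foldl (fun acc i =>
      acc.bind fun n =>
        (PySem.List.pyGet? (pySplitDot i) 1).map fun c =>
          if c = e then n + 1 else n) (some n) = some (n + extFrecCnt L e) by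
    have := h 0; simpa [extFrecCount] using this
  induction L with
  | nil => intro n; simp [extFrecCnt]
  | cons s L ih =>
    intro n
    have hs := extFrecExt?_isSome (hpre s (by simp))
    obtain ⟨c, hc⟩ := Option.isSome_iff_exists.mp hs
    have hrest : ∀ x ∈ L, 2 ≤ (pySplitDot x).length :=
      fun x hx => hpre x (List.mem_cons_of_mem _ hx)
    simp only [List.foldl_cons, Option.bind_some]
    rw [show PySem.List.pyGet? (pySplitDot s) 1 = some c from hc]
    rw [extFrecCnt_cons]
    have hce : (extFrecExt? s = some e) ↔ (c = e) := by
      constructor <;> intro h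
      · have : some c = some e := by rw [← hc]; exact h
        exact Option.some.inj this
      · rw [← h]; exact hc
    by_cases h : c = e
    · simp [h, ih hrest, hce.mpr h]; ring
    · simp [h, ih hrest]
      exact fun hh => h (hce.mp hh)

-- ===== VERDICT (by name: the statement is the Claim_ definition above) =====
theorem extension_frecuente_spec : Claim_equal_extension_frecuente := by
  intro L _ hpre
  unfold Spec_extension_frecuente extension_frecuente extension_frecuente_alt
  rw [extFrecFoldA L hpre 0 0 0,
      extFrecCount_eq L "txt" hpre, extFrecCount_eq L "docx" hpre, extFrecCount_eq L "py" hpre]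
  simp only [zero_add]
  set t := extFrecCnt L "txt"
  set d := extFrecCnt L "docx"
  set p := extFrecCnt L "py"
  by_cases h1 : t = max t (max d p)
  · simp [h1.symm]
  · by_cases h2 : d = max t (max d p)
    · rw [if_neg h1, if_pos h2, if_neg h1, if_pos h2]
    · have h3 : p = max t (max d p) := by
        rcases max_cases t (max d p) with ⟨he, _⟩ | ⟨he, _⟩
        · exact absurd he.symm h1
        · rcases max_cases d p with ⟨he2, _⟩ | ⟨he2, _⟩
          · exact absurd (he.trans he2).symm h2
          · rw [he, he2]
      rw [if_neg h1, if_neg h2, if_pos h3, if_neg h1, if_neg h2]
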